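-- pv_equiv track=rewrite | github.com/muksiddheswar/Solutions-Python | Python/no_idea.py | no_idea
-- ===== SOURCE A (Python) =====
-- def no_idea(arr, A, B):
--     score = 0
--     for element in arr:
--         if element in A:
--             score += 1
--         if element in B:
--             score -= 1
--     return score
-- ===== SOURCE B (Python) =====
-- def no_idea(arr, A, B):
--     counts = {}
--     for e in arr:
--         counts[e] = counts.get(e, 0) + 1
--     sa = set(A)
--     sb = set(B)
--     score = 0
--     for e, c in counts.items():
--         if e in sa:
--             score += c
--         if e in sb:
--             score -= c
--     return score
-- ===== Notes on version B (the rewrite author's own statement) =====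
-- stated objective: alternative
-- what changed: B builds a frequency table of arr once and makes one weighted pass over its distinct keys against set(A)/set(B), instead of scanning lists A and B for every element of arr.
import Mathlib
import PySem

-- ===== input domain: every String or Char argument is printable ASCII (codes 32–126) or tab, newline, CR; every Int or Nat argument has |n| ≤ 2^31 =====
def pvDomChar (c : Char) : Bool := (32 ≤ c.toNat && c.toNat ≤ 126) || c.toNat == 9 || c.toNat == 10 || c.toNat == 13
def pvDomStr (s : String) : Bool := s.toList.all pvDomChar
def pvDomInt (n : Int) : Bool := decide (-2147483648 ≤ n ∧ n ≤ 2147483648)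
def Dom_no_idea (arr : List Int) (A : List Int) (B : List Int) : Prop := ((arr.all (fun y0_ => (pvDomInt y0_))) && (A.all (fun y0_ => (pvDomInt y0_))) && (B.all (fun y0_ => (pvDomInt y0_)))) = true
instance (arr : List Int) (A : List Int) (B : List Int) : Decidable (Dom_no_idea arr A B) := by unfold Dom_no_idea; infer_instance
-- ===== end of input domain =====

-- B replaces A's per-element scans of lists A and B by one frequency table over arr
-- and one weighted pass over its distinct keys against set(A)/set(B).

-- ===== PORT A =====
def no_idea (arr : List Int) (A : List Int) (B : List Int) : Int :=
  arr.foldl (fun score element =>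
    let score := if A.contains element then score + 1 else score
    if B.contains element then score - 1 else score) 0

-- ===== PORT B =====
def no_idea_alt (arr : List Int) (A : List Int) (B : List Int) : Int :=
  let counts := arr.foldl (fun d e => d.insert e (d.getD e 0 + 1)) PySem.Dict.empty
  let sa := PySem.Set.ofList A
  let sb := PySem.Set.ofList B
  counts.items.foldl (fun score p =>
    let score := if PySem.Set.contains sa p.1 then score + p.2 else score
    if PySem.Set.contains sb p.1 then score - p.2 else score) 0

-- ===== PRECONDITION & SPEC =====
def Spec_no_idea (arr : List Int) (A : List Int) (B : List Int) (out : Int) : Prop := out = no_idea_alt arr A B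
instance (arr : List Int) (A : List Int) (B : List Int) (out : Int) : Decidable (Spec_no_idea arr A B out) := by unfold Spec_no_idea; infer_instance

-- ===== CLAIM (what is proved, stated in full; the proofs are below) =====
def Claim_equal_no_idea : Prop := ∀ (arr : List Int) (A : List Int) (B : List Int), Dom_no_idea arr A B → Spec_no_idea arr A B (no_idea arr A B)

-- ===== LEMMAS AND PROOFS =====

-- a fold whose step adds g x to the accumulator is init + sum of g
theorem foldl_step_add {α : Type} (f : Int → α → Int) (g : α → Int)
    (h : ∀ s x, f s x = s + g x) (l : List α) (init : Int) :
    l.foldl f init = init + (l.map g).sum := by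
  induction l generalizing init with
  | nil => simp
  | cons x xs ih => simp [List.foldl_cons, h, ih, add_assoc]

-- the per-element weight both programs tally
def pvW (A B : List Int) (e : Int) : Int :=
  (if e ∈ A then 1 else 0) - (if e ∈ B then 1 else 0)

theorem ofList_toFinset (l : List Int) :
    (PySem.Set.ofList l).toFinset = l.toFinset := by
  ext x; simp [PySem.Set.mem_ofList]

-- weighted sum over distinct keys = per-element sum
theorem distinct_weighted_sum (A B l : List Int) :
    ((PySem.Set.ofList l).map (fun k => pvW A B k * (l.count k : Int))).sum
      = (l.map (pvW A B)).sum := by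
  rw [← List.sum_toFinset _ (PySem.Set.nodup_ofList l), ofList_toFinset,
      Finset.sum_list_map_count]
  refine Finset.sum_congr rfl (fun m _ => ?_)
  simp [mul_comm]

theorem no_idea_eq (arr A B : List Int) :
    no_idea arr A B = no_idea_alt arr A B := by
  unfold no_idea no_idea_alt
  rw [foldl_step_add _ (pvW A B) (by
        intro s x; unfold pvW; by_cases hA : x ∈ A <;> by_cases hB : x ∈ B <;>
          simp [hA, hB] <;> omega)]
  rw [PySem.Dict.foldl_insert_getD_add_one_eq_counter, foldl_step_add _
        (fun p : Int × Int => pvW A B p.1 * p.2) (by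
        intro s p; unfold pvW
        by_cases hA : p.1 ∈ A <;> by_cases hB : p.1 ∈ B <;>
          simp [hA, hB, PySem.Set.mem_ofList] <;> ring)]
  rw [PySem.Dict.items_counter, List.map_map]
  simpa using (distinct_weighted_sum A B arr).symm

-- ===== VERDICT (by name: the statement is the Claim_ definition above) =====
theorem no_idea_spec : Claim_equal_no_idea := by
  intro arr A B _
  exact no_idea_eq arr A B
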